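-- pv_equiv track=rewrite | github.com/Gavenz/FYP | wordpuzzle.py | pop_with_snapshots
-- ===== SOURCE A (Python) =====
-- def pop_with_snapshots(heap_arr):
--     """
--     Demo delete-max on a COPY of heap_arr (min-heap storing (-len, word)).
--     Returns: popped_word, steps, final_heap
--     """
--     H = list(heap_arr)  # ✅ copy
--     steps = []
--     if not H:
--         return None, [("maxheap empty", [], None, None)], []
--
--     steps.append(("Initiate maxheap", list(H), 0, None))
--
--     last = len(H) - 1
--     H[0], H[last] = H[last], H[0]
--     steps.append((f"swap root {H[last][1]} with last node {H[0][1]}", list(H), 0, last))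
--
--     popped = H.pop()
--     steps.append((f"popped last node {popped[1]}", list(H), 0, None))
--
--     i = 0
--     n = len(H)
--     while True:
--         l = 2*i + 1
--         r = 2*i + 2
--         if l >= n:
--             steps.append((f"stop as no children at node={i}", list(H), i, None))
--             break
--
--         smallest = l
--         if r < n and H[r][0] < H[l][0]:
--             smallest = r
--
--         steps.append((f"compare parent={H[i][1]} vs child={H[smallest][1]}",
--                       list(H), i, smallest))
--
--         if H[smallest][0] < H[i][0]:
--             H[i], H[smallest] = H[smallest], H[i]
--             steps.append((f"sift-down swap {H[i][1]} <-> {H[smallest][1]}", list(H), smallest, None))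
--             i = smallest
--         else:
--             steps.append((f"stop as maxheap property holds at node={i}", list(H), i, smallest))
--             break
--
--     steps.append(("maxheap restored", list(H), None, None))
--     return popped[1], steps, H
-- ===== SOURCE B (Python) =====
-- def _render(ev):
--     """Turn one abstract event into the snapshot tuple A emits."""
--     tag = ev[0]
--     if tag == "init":
--         return ("Initiate maxheap", ev[1], 0, None)
--     if tag == "rootswap":
--         H, last = ev[1], ev[2]
--         return ("swap root %s with last node %s" % (H[last][1], H[0][1]), H, 0, last)
--     if tag == "pop":
--         return ("popped last node %s" % ev[2], ev[1], 0, None)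
--     if tag == "leaf":
--         return ("stop as no children at node=%d" % ev[2], ev[1], ev[2], None)
--     if tag == "cmp":
--         H, i, c = ev[1], ev[2], ev[3]
--         return ("compare parent=%s vs child=%s" % (H[i][1], H[c][1]), H, i, c)
--     if tag == "swap":
--         H, i, c = ev[1], ev[2], ev[3]
--         return ("sift-down swap %s <-> %s" % (H[i][1], H[c][1]), H, c, None)
--     if tag == "hold":
--         return ("stop as maxheap property holds at node=%d" % ev[2], ev[1], ev[2], ev[3])
--     return ("maxheap restored", ev[1], None, None)
--
--
-- def _swapped(H, i, c):
--     """Fresh list with positions i and c exchanged (no mutation)."""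
--     return [H[c] if k == i else H[i] if k == c else x for k, x in enumerate(H)]
--
--
-- def _sift_events(H, i, n):
--     """Recursive sift-down producing (final heap, abstract event trail)."""
--     l, r = 2 * i + 1, 2 * i + 2
--     if l >= n:
--         return H, [("leaf", H, i)]
--     c = l if r >= n or H[l][0] <= H[r][0] else r
--     if H[c][0] < H[i][0]:
--         H2 = _swapped(H, i, c)
--         final, rest = _sift_events(H2, c, n)
--         return final, [("cmp", H, i, c), ("swap", H2, i, c)] + rest
--     return H, [("cmp", H, i, c), ("hold", H, i, c)]
--
--
-- def pop_with_snapshots(heap_arr):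
--     if not heap_arr:
--         return None, [("maxheap empty", [], None, None)], []
--     n = len(heap_arr)
--     S = _swapped(heap_arr, 0, n - 1)
--     H = S[:-1]
--     final, sift = _sift_events(H, 0, n - 1)
--     events = ([("init", list(heap_arr)), ("rootswap", S, n - 1),
--                ("pop", H, heap_arr[0][1])] + sift + [("restored", final)])
--     return heap_arr[0][1], [_render(e) for e in events], final
-- ===== Notes on version B (the rewrite author's own statement) =====
-- stated objective: alternative
-- what changed: A mutates one heap in place and appends formatted snapshot tuples as it loops; B is a two-stage pipeline: a pure recursive sift over fresh lists (comprehension-built swaps, direct slice/index for the root pop) emits an abstract event trail, which a separate render pass turns into the snapshot tuples.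
import Mathlib
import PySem

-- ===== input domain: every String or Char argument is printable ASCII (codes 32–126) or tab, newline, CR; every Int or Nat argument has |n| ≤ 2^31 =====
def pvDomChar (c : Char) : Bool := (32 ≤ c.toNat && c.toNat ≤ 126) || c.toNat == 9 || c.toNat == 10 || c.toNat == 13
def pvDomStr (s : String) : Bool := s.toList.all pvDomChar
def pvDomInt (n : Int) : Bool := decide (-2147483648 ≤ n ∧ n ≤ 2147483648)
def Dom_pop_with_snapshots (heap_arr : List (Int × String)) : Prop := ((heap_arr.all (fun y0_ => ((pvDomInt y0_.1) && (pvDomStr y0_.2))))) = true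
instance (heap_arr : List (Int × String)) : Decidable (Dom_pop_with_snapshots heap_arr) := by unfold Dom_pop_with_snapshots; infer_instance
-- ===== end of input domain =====

-- B replaces A's in-place while-loop that builds snapshot strings as it goes by a two-stage
-- pipeline: a pure recursive sift producing abstract events, then a render pass; objective: alternative.

-- one snapshot: (message, heap copy, index1, index2)
abbrev PvStep := String × (List (Int × String)) × Option Int × Option Int

def pvDefault : Int × String := (0, "")

-- ===== PORT A =====
-- Python's `H[i], H[j] = H[j], H[i]` (in-place double assignment)
def pvSwap (H : List (Int × String)) (i j : Nat) : List (Int × String) :=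
  (H.set i (H.getD j pvDefault)).set j (H.getD i pvDefault)

-- A's `smallest` selection
def pvChild (H : List (Int × String)) (i n : Nat) : Nat :=
  if 2*i + 2 < n ∧ (H.getD (2*i + 2) pvDefault).1 < (H.getD (2*i + 1) pvDefault).1
  then 2*i + 2 else 2*i + 1

-- termination bound, cited by the decreasing_by blocks
theorem pvChild_bounds (H : List (Int × String)) (i n : Nat) (h : ¬ 2*i + 1 ≥ n) :
    i < pvChild H i n ∧ pvChild H i n < n := by
  unfold pvChild; split <;> omega

-- A's `while True` sift-down loop, carrying the growing steps accumulator
def pvLoopA (H : List (Int × String)) (n i : Nat) (steps : List PvStep) :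
    List PvStep × List (Int × String) :=
  if hl : 2*i + 1 ≥ n then
    (steps ++ [("stop as no children at node=" ++ PySem.Int.toStr i, H, some (i:Int), none)], H)
  else
    let smallest := pvChild H i n
    let steps := steps ++ [("compare parent=" ++ (H.getD i pvDefault).2 ++ " vs child=" ++
        (H.getD smallest pvDefault).2, H, some (i:Int), some (smallest:Int))]
    if (H.getD smallest pvDefault).1 < (H.getD i pvDefault).1 then
      let H' := pvSwap H i smallest
      let steps := steps ++ [("sift-down swap " ++ (H'.getD i pvDefault).2 ++ " <-> " ++
          (H'.getD smallest pvDefault).2, H', some (smallest:Int), none)]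
      pvLoopA H' n smallest steps
    else
      (steps ++ [("stop as maxheap property holds at node=" ++ PySem.Int.toStr i, H,
        some (i:Int), some (smallest:Int))], H)
termination_by n - i
decreasing_by
  have := pvChild_bounds H i n hl; omega

def pop_with_snapshots (heap_arr : List (Int × String)) :
    Option String × (List PvStep) × (List (Int × String)) :=
  let H := heap_arr
  if H.isEmpty then (none, [("maxheap empty", [], none, none)], [])
  else
    let steps : List PvStep := [("Initiate maxheap", H, some 0, none)]
    let last := H.length - 1
    let H := pvSwap H 0 last
    let steps := steps ++ [("swap root " ++ (H.getD last pvDefault).2 ++ " with last node " ++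
      (H.getD 0 pvDefault).2, H, some 0, some (last:Int))]
    let popped := H.getD (H.length - 1) pvDefault
    let H := H.dropLast
    let steps := steps ++ [("popped last node " ++ popped.2, H, some 0, none)]
    let res := pvLoopA H H.length 0 steps
    (some popped.2, res.1 ++ [("maxheap restored", res.2, none, none)], res.2)

-- ===== PORT B =====
-- abstract event trail of Source B (_sift_events / the events list)
inductive PvEv
  | init     (H : List (Int × String))
  | rootswap (H : List (Int × String)) (last : Nat)
  | pop      (H : List (Int × String)) (w : String)
  | leaf     (H : List (Int × String)) (i : Nat)
  | cmp      (H : List (Int × String)) (i c : Nat)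
  | swapE    (H : List (Int × String)) (i c : Nat)
  | hold     (H : List (Int × String)) (i c : Nat)
  | restored (H : List (Int × String))
deriving DecidableEq, Repr

-- Source B _render
def pvRender : PvEv → PvStep
  | .init H => ("Initiate maxheap", H, some 0, none)
  | .rootswap H last => ("swap root " ++ (H.getD last pvDefault).2 ++ " with last node " ++
      (H.getD 0 pvDefault).2, H, some 0, some (last:Int))
  | .pop H w => ("popped last node " ++ w, H, some 0, none)
  | .leaf H i => ("stop as no children at node=" ++ PySem.Int.toStr i, H, some (i:Int), none)
  | .cmp H i c => ("compare parent=" ++ (H.getD i pvDefault).2 ++ " vs child=" ++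
      (H.getD c pvDefault).2, H, some (i:Int), some (c:Int))
  | .swapE H i c => ("sift-down swap " ++ (H.getD i pvDefault).2 ++ " <-> " ++
      (H.getD c pvDefault).2, H, some (c:Int), none)
  | .hold H i c => ("stop as maxheap property holds at node=" ++ PySem.Int.toStr i, H,
      some (i:Int), some (c:Int))
  | .restored H => ("maxheap restored", H, none, none)

-- Source B _swapped: fresh list built by a comprehension over enumerate(H)
def pvSwapped (H : List (Int × String)) (i c : Nat) : List (Int × String) :=
  H.zipIdx.map (fun xk => if xk.2 = i then H.getD c pvDefault
                          else if xk.2 = c then H.getD i pvDefault else xk.1)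

-- Source B's `c = l if r >= n or H[l][0] <= H[r][0] else r`
def pvChildB (H : List (Int × String)) (i n : Nat) : Nat :=
  if 2*i + 2 ≥ n ∨ (H.getD (2*i + 1) pvDefault).1 ≤ (H.getD (2*i + 2) pvDefault).1
  then 2*i + 1 else 2*i + 2

theorem pvChildB_eq (H : List (Int × String)) (i n : Nat) :
    pvChildB H i n = pvChild H i n := by
  unfold pvChildB pvChild
  by_cases h : 2*i + 2 < n ∧ (H.getD (2*i + 2) pvDefault).1 < (H.getD (2*i + 1) pvDefault).1
  · rw [if_pos h, if_neg]
    rintro (hb | hb)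
    · omega
    · exact absurd h.2 (not_lt.mpr hb)
  · rw [if_neg h, if_pos]
    rcases Nat.lt_or_ge (2*i + 2) n with h2 | h2
    · exact Or.inr (le_of_not_gt fun hlt => h ⟨h2, hlt⟩)
    · exact Or.inl h2

-- Source B _sift_events: pure recursion returning (final heap, event suffix)
def pvSiftEv (H : List (Int × String)) (i n : Nat) :
    List (Int × String) × List PvEv :=
  if hl : 2*i + 1 ≥ n then (H, [.leaf H i])
  else
    let c := pvChildB H i n
    if (H.getD c pvDefault).1 < (H.getD i pvDefault).1 then
      let H2 := pvSwapped H i c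
      let res := pvSiftEv H2 c n
      (res.1, .cmp H i c :: .swapE H2 i c :: res.2)
    else (H, [.cmp H i c, .hold H i c])
termination_by n - i
decreasing_by
  have := pvChild_bounds H i n hl; rw [pvChildB_eq]; omega

def pop_with_snapshots_alt (heap_arr : List (Int × String)) :
    Option String × (List PvStep) × (List (Int × String)) :=
  if heap_arr.isEmpty then (none, [("maxheap empty", [], none, none)], [])
  else
    let n := heap_arr.length
    let S := pvSwapped heap_arr 0 (n - 1)
    let H := S.dropLast          -- S[:-1]
    let res := pvSiftEv H 0 (n - 1)
    let events : List PvEv :=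
      [.init heap_arr, .rootswap S (n - 1), .pop H (heap_arr.getD 0 pvDefault).2]
        ++ res.2 ++ [.restored res.1]
    ((heap_arr.getD 0 pvDefault).2, events.map pvRender, res.1)

-- ===== PRECONDITION & SPEC =====
def Spec_pop_with_snapshots (heap_arr : List (Int × String)) (out : Option String × (List (String × (List (Int × String)) × Option Int × Option Int)) × (List (Int × String))) : Prop := out = pop_with_snapshots_alt heap_arr
instance (heap_arr : List (Int × String)) (out : Option String × (List (String × (List (Int × String)) × Option Int × Option Int)) × (List (Int × String))) : Decidable (Spec_pop_with_snapshots heap_arr out) := by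
  unfold Spec_pop_with_snapshots
  letI : DecidableEq (String × (List (Int × String)) × Option Int × Option Int) := inferInstance
  infer_instance

-- ===== CLAIM (what is proved, stated in full; the proofs are below) =====
def Claim_equal_pop_with_snapshots : Prop := ∀ (heap_arr : List (Int × String)), Dom_pop_with_snapshots heap_arr → Spec_pop_with_snapshots heap_arr (pop_with_snapshots heap_arr)

-- ===== LEMMAS AND PROOFS =====

-- B's comprehension swap equals A's double-assignment swap when both indices are in range
theorem pvSwapped_eq_pvSwap (H : List (Int × String)) (i c : Nat)
    (hi : i < H.length) (hc : c < H.length) :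
    pvSwapped H i c = pvSwap H i c := by
  apply List.ext_getElem
  · simp [pvSwapped, pvSwap]
  · intro k hk hk'
    have e1 : H.getD i pvDefault = H[i] := List.getD_eq_getElem H pvDefault hi
    have e2 : H.getD c pvDefault = H[c] := List.getD_eq_getElem H pvDefault hc
    simp only [pvSwapped, pvSwap, List.getElem_map, List.getElem_zipIdx,
      List.getElem_set, e1, e2]
    split_ifs <;> first | rfl | omega | (apply getElem_congr rfl (by omega))

-- A's loop = render of B's event trail, appended to the accumulator
theorem pvLoopA_eq_siftEv (k : Nat) : ∀ (H : List (Int × String)) (n i : Nat)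
    (steps : List PvStep), n - i ≤ k → n ≤ H.length →
    pvLoopA H n i steps = (steps ++ (pvSiftEv H i n).2.map pvRender, (pvSiftEv H i n).1) := by
  induction k with
  | zero =>
      intro H n i steps h hn
      have hl : 2*i + 1 ≥ n := by omega
      rw [pvLoopA, pvSiftEv]
      simp [hl, pvRender]
  | succ k ih =>
      intro H n i steps h hn
      rw [pvLoopA, pvSiftEv]
      by_cases hl : 2*i + 1 ≥ n
      · simp [hl, pvRender]
      · have hb := pvChild_bounds H i n hl
        simp only [dif_neg hl, pvChildB_eq]
        by_cases hs : (H.getD (pvChild H i n) pvDefault).1 < (H.getD i pvDefault).1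
        · simp only [if_pos hs]
          rw [pvSwapped_eq_pvSwap H i (pvChild H i n) (by omega) (by omega)]
          rw [ih _ _ _ _ (by omega) (by simp [pvSwap]; omega)]
          simp [pvRender]
        · simp only [if_neg hs]
          simp [pvRender]
  
-- ===== VERDICT (by name: the statement is the Claim_ definition above) =====
theorem pop_with_snapshots_spec : Claim_equal_pop_with_snapshots := by
  intro heap_arr _
  unfold Spec_pop_with_snapshots pop_with_snapshots pop_with_snapshots_alt
  by_cases h : heap_arr.isEmpty
  · simp [h]
  · have hlen : 0 < heap_arr.length := by cases heap_arr <;> simp_all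
    simp only [h, Bool.false_eq_true, if_false]
    rw [pvSwapped_eq_pvSwap heap_arr 0 (heap_arr.length - 1) hlen (by omega)]
    have hslen : (pvSwap heap_arr 0 (heap_arr.length - 1)).length = heap_arr.length := by
      simp [pvSwap]
    have hpop : (pvSwap heap_arr 0 (heap_arr.length - 1)).getD
        ((pvSwap heap_arr 0 (heap_arr.length - 1)).length - 1) pvDefault
        = heap_arr.getD 0 pvDefault := by
      rw [hslen]
      unfold pvSwap
      rw [List.getD_eq_getElem _ _ (by simp; omega)]
      rw [List.getElem_set_self (by simp; omega)]
    have hdlen : (pvSwap heap_arr 0 (heap_arr.length - 1)).dropLast.length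
        = heap_arr.length - 1 := by simp [hslen]
    rw [pvLoopA_eq_siftEv (heap_arr.length - 1) _ _ _ _ (by omega) (by omega)]
    rw [hdlen, hpop]
    simp [pvRender]
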